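-- pv_equiv track=rewrite | github.com/khahnmad/GenModel-Experiments | analyze/cluster_wo_vectorization/prep_data_flatten.py | alphabetize_existing_dict
-- ===== SOURCE A (Python) =====
-- def alphabetize_existing_dict(data):
--     alphabetized = {'a': [], 'b': [], 'c': [], 'd': [], 'e': [], 'f': [], 'g': [], 'h': [], 'i': [], 'j': [], 'k': [], 'l': [], 'm': [], 'n': [], 'o': [], 'p': [], 'q': [], 'r': [], 's': [], 't': [], 'u': [], 'v': [], 'w': [], 'x': [], 'y': [], 'z': []}
--     for h in data.keys():
--         if len(h)>0:
--             letter = h[0].lower()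
--         else:
--             letter = ''
--         if letter not in alphabetized.keys():
--             alphabetized[letter] = []
--
--         for vil in data[h].keys():
--             for vic in data[h][vil]:
--                 for elt in data[h][vil][vic]:
--                     alphabetized[letter].append([h,vil,vic]+elt)
--     return alphabetized
-- ===== SOURCE B (Python) =====
-- def alphabetize_existing_dict(data):
--     def letter(h):
--         return h[0].lower() if h else ''
--     # pass 1: flatten the nested dict into a flat list of (letter, row) pairs
--     rows = []
--     for h, hv in data.items():
--         for vil, vv in hv.items():
--             for vic, cv in vv.items():
--                 for elt in cv:
--                     rows.append((letter(h), [h, vil, vic] + elt))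
--     # pass 2: the bucket keys: a-z, then extra letters in first-occurrence order
--     keys = list('abcdefghijklmnopqrstuvwxyz')
--     for h in data:
--         l = letter(h)
--         if l not in keys:
--             keys.append(l)
--     # pass 3: each bucket is computed independently by filtering the flat list
--     return {k: [row for l, row in rows if l == k] for k in keys}
-- ===== Notes on version B (the rewrite author's own statement) =====
-- stated objective: alternative
-- what changed: A builds the result by appending each row into a mutable bucket dict during one interleaved nested-dict walk; B never appends into a dict: it flattens to a (letter,row) list, computes the bucket-key list separately, and constructs every bucket value independently as a per-key filter of the flat list.
import Mathlib
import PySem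

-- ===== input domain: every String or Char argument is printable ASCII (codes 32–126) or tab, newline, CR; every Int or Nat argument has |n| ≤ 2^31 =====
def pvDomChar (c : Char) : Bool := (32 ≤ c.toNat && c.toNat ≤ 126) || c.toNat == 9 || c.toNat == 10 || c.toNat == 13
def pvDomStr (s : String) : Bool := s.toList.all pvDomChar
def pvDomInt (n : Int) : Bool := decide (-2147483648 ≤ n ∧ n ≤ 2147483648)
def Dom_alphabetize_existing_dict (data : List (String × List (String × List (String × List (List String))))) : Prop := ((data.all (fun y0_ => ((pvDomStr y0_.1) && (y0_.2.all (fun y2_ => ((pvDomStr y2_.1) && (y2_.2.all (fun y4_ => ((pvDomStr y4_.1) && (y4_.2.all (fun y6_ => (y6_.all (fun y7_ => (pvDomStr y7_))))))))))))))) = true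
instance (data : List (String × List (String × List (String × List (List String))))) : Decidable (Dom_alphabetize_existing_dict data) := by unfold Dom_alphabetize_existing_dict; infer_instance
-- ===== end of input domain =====

-- B replaces A's append-into-mutable-dict walk by three passes — flatten to (letter,row) pairs,
-- compute the bucket-key list, build each bucket independently as a per-key filter; same result.
-- Dicts are ported as insertion-ordered association lists; Python dict keys are unique, so the
-- iterations `for h in data.keys(): … data[h] …` are ported as traversals of the (key, value)
-- pairs themselves (exact for every value a Python dict can hold).

-- ===== PORT A =====
-- `h[0].lower() if len(h)>0 else ''` (both Pythons compute this expression)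
def pvLetter (h : String) : String :=
  if 0 < PySem.Str.len h then
    match PySem.Str.pyGet? h 0 with
    | some c => PySem.Str.lower (String.ofList [c])
    | none => ""
  else ""

-- `letter not in alphabetized.keys()`
def pvHasKey (d : List (String × List (List String))) (k : String) : Bool :=
  d.any (fun p => p.1 == k)

-- `if letter not in alphabetized.keys(): alphabetized[letter] = []`
def pvEnsure (d : List (String × List (List String))) (k : String) :
    List (String × List (List String)) :=
  if pvHasKey d k then d else d ++ [(k, [])]

-- `alphabetized[letter].append(row)` (dict keys are unique, so updating the matching entry)
def pvAppendAt (d : List (String × List (List String))) (k : String) (r : List String) :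
    List (String × List (List String)) :=
  d.map (fun p => if p.1 == k then (p.1, p.2 ++ [r]) else p)

def pvInitDict : List (String × List (List String)) :=
  [("a",[]),("b",[]),("c",[]),("d",[]),("e",[]),("f",[]),("g",[]),("h",[]),("i",[]),
   ("j",[]),("k",[]),("l",[]),("m",[]),("n",[]),("o",[]),("p",[]),("q",[]),("r",[]),
   ("s",[]),("t",[]),("u",[]),("v",[]),("w",[]),("x",[]),("y",[]),("z",[])]

def alphabetize_existing_dict (data : List (String × List (String × List (String × List (List String))))) : List (String × List (List String)) :=
  data.foldl (fun alphabetized hp =>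
    let letter := pvLetter hp.1
    let alphabetized := pvEnsure alphabetized letter
    hp.2.foldl (fun acc vp =>
      vp.2.foldl (fun acc cp =>
        cp.2.foldl (fun acc elt =>
          pvAppendAt acc letter ([hp.1, vp.1, cp.1] ++ elt)) acc) acc) alphabetized)
    pvInitDict

-- ===== PORT B =====
-- pass 1 of Source B: `rows.append((letter(h), [h,vil,vic]+elt))` in the nested loops
def pvRowsB (data : List (String × List (String × List (String × List (List String))))) :
    List (String × List String) :=
  data.foldl (fun rows hp =>
    hp.2.foldl (fun rows vp =>
      vp.2.foldl (fun rows cp =>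
        cp.2.foldl (fun rows elt =>
          rows ++ [(pvLetter hp.1, [hp.1, vp.1, cp.1] ++ elt)]) rows) rows) rows) []

-- pass 2 of Source B: `keys = list('abc…'); for h in data: if l not in keys: keys.append(l)`
def pvKeysB (data : List (String × List (String × List (String × List (List String))))) :
    List String :=
  data.foldl (fun ks hp =>
    let l := pvLetter hp.1
    if ks.contains l then ks else ks ++ [l])
    ("abcdefghijklmnopqrstuvwxyz".toList.map (fun c => String.ofList [c]))

def alphabetize_existing_dict_alt (data : List (String × List (String × List (String × List (List String))))) : List (String × List (List String)) :=
  let rows := pvRowsB data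
  let keys := pvKeysB data
  -- pass 3 of Source B: `{k: [row for l, row in rows if l == k] for k in keys}`
  keys.map (fun k => (k, (rows.filter (fun lr => lr.1 == k)).map (fun lr => lr.2)))

-- ===== PRECONDITION & SPEC =====
def Spec_alphabetize_existing_dict (data : List (String × List (String × List (String × List (List String))))) (out : List (String × List (List String))) : Prop := out = alphabetize_existing_dict_alt data
instance (data : List (String × List (String × List (String × List (List String))))) (out : List (String × List (List String))) : Decidable (Spec_alphabetize_existing_dict data out) := by unfold Spec_alphabetize_existing_dict; infer_instance

-- ===== CLAIM =====
def Claim_equal_alphabetize_existing_dict : Prop := ∀ (data : List (String × List (String × List (String × List (List String))))), Dom_alphabetize_existing_dict data → Spec_alphabetize_existing_dict data (alphabetize_existing_dict data)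

-- ===== LEMMAS AND PROOFS =====

-- the flat row list, in flatMap form, and A's passes, named for the proofs
def pvRows (data : List (String × List (String × List (String × List (List String))))) :
    List (String × List String) :=
  data.flatMap (fun hp =>
    hp.2.flatMap (fun vp =>
      vp.2.flatMap (fun cp =>
        cp.2.map (fun elt => (pvLetter hp.1, [hp.1, vp.1, cp.1] ++ elt)))))

def pvRowsPass (d : List (String × List (List String))) (rs : List (String × List String)) :
    List (String × List (List String)) :=
  rs.foldl (fun d lr => pvAppendAt d lr.1 lr.2) d

def pvKeysPass (d : List (String × List (List String)))
    (ks : List (String × List (String × List (String × List (List String))))) :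
    List (String × List (List String)) :=
  ks.foldl (fun d hp => pvEnsure d (pvLetter hp.1)) d

def pvKeysFold (ks : List String)
    (data : List (String × List (String × List (String × List (List String))))) : List String :=
  data.foldl (fun ks hp =>
    let l := pvLetter hp.1
    if ks.contains l then ks else ks ++ [l]) ks

-- A's per-key triple loop equals one grouping pass over that key's flat rows
theorem pvInner_eq_rowsPass (hp : String × List (String × List (String × List (List String))))
    (d : List (String × List (List String))) :
    hp.2.foldl (fun acc vp =>
      vp.2.foldl (fun acc cp =>
        cp.2.foldl (fun acc elt =>
          pvAppendAt acc (pvLetter hp.1) ([hp.1, vp.1, cp.1] ++ elt)) acc) acc) d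
    = pvRowsPass d (hp.2.flatMap (fun vp =>
        vp.2.flatMap (fun cp =>
          cp.2.map (fun elt => (pvLetter hp.1, [hp.1, vp.1, cp.1] ++ elt))))) := by
  simp only [pvRowsPass, List.foldl_flatMap, List.foldl_map]

theorem pvRowsPass_append (d : List (String × List (List String)))
    (rs ss : List (String × List String)) :
    pvRowsPass d (rs ++ ss) = pvRowsPass (pvRowsPass d rs) ss := by
  simp [pvRowsPass, List.foldl_append]

-- a grouping pass from any dict d is the per-entry filter of the row list
theorem pvRowsPass_eq_filter (rs : List (String × List String))
    (d : List (String × List (List String))) :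
    pvRowsPass d rs
      = d.map (fun p => (p.1, p.2 ++ (rs.filter (fun lr => lr.1 == p.1)).map (fun lr => lr.2))) := by
  induction rs generalizing d with
  | nil => simp [pvRowsPass]
  | cons lr rs ih =>
    show pvRowsPass (pvAppendAt d lr.1 lr.2) rs = _
    rw [ih, pvAppendAt, List.map_map]
    apply List.map_congr_left
    intro p _
    by_cases h : p.1 = lr.1
    · simp [Function.comp, h]
    · have h' : ¬ (lr.1 = p.1) := fun e => h e.symm
      simp [Function.comp, h, h']

-- A's ensure pass over a dict of empty buckets is B's key fold, mapped to empty buckets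
theorem pvKeysPass_eq_keysFold
    (data : List (String × List (String × List (String × List (List String)))))
    (ks : List String) :
    pvKeysPass (ks.map (fun k => (k, ([] : List (List String))))) data
      = (pvKeysFold ks data).map (fun k => (k, ([] : List (List String)))) := by
  induction data generalizing ks with
  | nil => rfl
  | cons hp rest ih =>
    have hk : pvHasKey (ks.map (fun k => (k, ([] : List (List String))))) (pvLetter hp.1)
        = ks.contains (pvLetter hp.1) := by
      simp [pvHasKey, List.any_map, Function.comp_def, List.any_beq']
    show pvKeysPass
        (pvEnsure (ks.map (fun k => (k, ([] : List (List String))))) (pvLetter hp.1)) rest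
      = (pvKeysFold ks (hp :: rest)).map (fun k => (k, ([] : List (List String))))
    have hfold : pvKeysFold ks (hp :: rest)
        = pvKeysFold (if ks.contains (pvLetter hp.1) then ks else ks ++ [pvLetter hp.1]) rest := rfl
    rw [pvEnsure, hk, hfold]
    by_cases h : ks.contains (pvLetter hp.1)
    · rw [if_pos h, if_pos h, ih ks]
    · rw [if_neg h, if_neg h]
      rw [show ks.map (fun k => (k, ([] : List (List String)))) ++ [(pvLetter hp.1, [])]
          = (ks ++ [pvLetter hp.1]).map (fun k => (k, ([] : List (List String)))) by simp]
      exact ih (ks ++ [pvLetter hp.1])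

-- key-membership facts used by the commutation lemmas
theorem pvHasKey_appendAt (d : List (String × List (List String))) (k k' : String)
    (r : List String) : pvHasKey (pvAppendAt d k r) k' = pvHasKey d k' := by
  unfold pvHasKey pvAppendAt
  rw [List.any_map]
  congr 1
  funext p
  by_cases h : p.1 = k <;> simp [h]

theorem pvHasKey_ensure (d : List (String × List (List String))) (k k' : String)
    (h : pvHasKey d k' = true) : pvHasKey (pvEnsure d k) k' = true := by
  unfold pvEnsure
  split
  · exact h
  · simp [pvHasKey] at h ⊢
    exact Or.inl h

theorem pvHasKey_ensure_self (d : List (String × List (List String))) (k : String) :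
    pvHasKey (pvEnsure d k) k = true := by
  unfold pvEnsure
  split
  · assumption
  · simp [pvHasKey]

theorem pvEnsure_appendAt_comm (d : List (String × List (List String))) (k k' : String)
    (r : List String) (hk : pvHasKey d k = true) :
    pvEnsure (pvAppendAt d k r) k' = pvAppendAt (pvEnsure d k') k r := by
  unfold pvEnsure
  rw [pvHasKey_appendAt]
  by_cases h' : pvHasKey d k' = true
  · simp [h']
  · have hne : k' ≠ k := fun hkk => h' (hkk ▸ hk)
    rw [if_neg h', if_neg h']
    simp [pvAppendAt, List.map_append, hne]

theorem pvEnsure_rowsPass_comm (rs : List (String × List String))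
    (d : List (String × List (List String))) (k' : String)
    (h : ∀ lr ∈ rs, pvHasKey d lr.1 = true) :
    pvEnsure (pvRowsPass d rs) k' = pvRowsPass (pvEnsure d k') rs := by
  induction rs generalizing d with
  | nil => rfl
  | cons lr rs ih =>
    simp only [pvRowsPass, List.foldl_cons]
    rw [show (rs.foldl (fun d lr => pvAppendAt d lr.1 lr.2) (pvAppendAt d lr.1 lr.2))
        = pvRowsPass (pvAppendAt d lr.1 lr.2) rs from rfl] at *
    rw [ih (pvAppendAt d lr.1 lr.2)
        (fun x hx => by rw [pvHasKey_appendAt]; exact h x (List.mem_cons_of_mem _ hx))]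
    rw [pvEnsure_appendAt_comm d lr.1 k' lr.2 (h lr (List.mem_cons_self))]
    rfl

theorem pvKeysPass_rowsPass_comm
    (ks : List (String × List (String × List (String × List (List String)))))
    (rs : List (String × List String)) (d : List (String × List (List String)))
    (h : ∀ lr ∈ rs, pvHasKey d lr.1 = true) :
    pvKeysPass (pvRowsPass d rs) ks = pvRowsPass (pvKeysPass d ks) rs := by
  induction ks generalizing d with
  | nil => rfl
  | cons hp ks ih =>
    simp only [pvKeysPass, List.foldl_cons]
    rw [show ∀ d', ks.foldl (fun d hp => pvEnsure d (pvLetter hp.1)) d' = pvKeysPass d' ks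
        from fun _ => rfl]
    rw [pvEnsure_rowsPass_comm rs d (pvLetter hp.1) h]
    exact ih (pvEnsure d (pvLetter hp.1))
      (fun x hx => pvHasKey_ensure _ _ _ (h x hx))

-- A's interleaved fold from any start dict equals the keys pass then one grouping pass
theorem pvMain (data : List (String × List (String × List (String × List (List String)))))
    (d : List (String × List (List String))) :
    data.foldl (fun alphabetized hp =>
      let letter := pvLetter hp.1
      let alphabetized := pvEnsure alphabetized letter
      hp.2.foldl (fun acc vp =>
        vp.2.foldl (fun acc cp =>
          cp.2.foldl (fun acc elt =>
            pvAppendAt acc letter ([hp.1, vp.1, cp.1] ++ elt)) acc) acc) alphabetized) d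
    = pvRowsPass (pvKeysPass d data) (pvRows data) := by
  induction data generalizing d with
  | nil => rfl
  | cons hp rest ih =>
    simp only [List.foldl_cons]
    rw [pvInner_eq_rowsPass hp (pvEnsure d (pvLetter hp.1))]
    rw [ih]
    have hkeys : ∀ lr ∈ (hp.2.flatMap (fun vp =>
        vp.2.flatMap (fun cp =>
          cp.2.map (fun elt => (pvLetter hp.1, [hp.1, vp.1, cp.1] ++ elt))))),
        pvHasKey (pvEnsure d (pvLetter hp.1)) lr.1 = true := by
      intro lr hlr
      simp only [List.mem_flatMap, List.mem_map] at hlr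
      obtain ⟨vp, _, cp, _, elt, _, heq⟩ := hlr
      rw [← heq]
      exact pvHasKey_ensure_self d (pvLetter hp.1)
    rw [pvKeysPass_rowsPass_comm rest _ _ hkeys]
    rw [← pvRowsPass_append]
    rfl

-- B's nested appending loops build the flatMap row list
theorem pvRowsB_eq (data : List (String × List (String × List (String × List (List String))))) :
    pvRowsB data = pvRows data := by
  simp only [pvRowsB, pvRows, PySem.List.foldl_append_singleton_eq_map,
    PySem.List.foldl_append_eq_flatMap]
  simp

theorem pvInit_eq :
    ("abcdefghijklmnopqrstuvwxyz".toList.map (fun c => String.ofList [c])).map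
      (fun k => (k, ([] : List (List String)))) = pvInitDict := by
  decide

-- ===== VERDICT =====
theorem alphabetize_existing_dict_spec : Claim_equal_alphabetize_existing_dict := by
  intro data _
  unfold Spec_alphabetize_existing_dict alphabetize_existing_dict alphabetize_existing_dict_alt
  rw [pvMain, ← pvInit_eq, pvKeysPass_eq_keysFold, pvRowsPass_eq_filter, List.map_map,
    pvRowsB_eq]
  rfl
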